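-- pv_equiv track=rewrite | github.com/Fr4nzisko/Bug_Bounty_Web_and_API_Tools | XSS/generate_payloads/script_xss_fr4nzisko/xss_shield_breaker4.py | codificar_payload
-- ===== SOURCE A (Python) =====
-- parejas_caracteres = {'(': ')', '{': '}', '[': ']', '<': '>'}
--
-- parejas_caracteres_inverso = {v: k for k, v in parejas_caracteres.items()}
--
-- def codificar_payload(payload, codificaciones):
--     pila = []
--     resultado = list(payload)
--
--     def codificar_en_posicion(pos, caracter, codificaciones):
--         if caracter in codificaciones:
--             resultado[pos] = codificaciones[caracter]
--
--     for i, char in enumerate(payload):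
--         if char in parejas_caracteres:
--             pila.append((char, i))
--         elif char in parejas_caracteres_inverso and pila:
--             ultimo_abierto, pos_abierto = pila[-1]
--             if parejas_caracteres_inverso[char] == ultimo_abierto:
--                 pila.pop()
--                 codificar_en_posicion(pos_abierto, ultimo_abierto, codificaciones)
--                 codificar_en_posicion(i, char, codificaciones)
--
--     # Codificar caracteres de apertura sin cierre
--     while pila:
--         abierto, pos_abierto = pila.pop()
--         codificar_en_posicion(pos_abierto, abierto, codificaciones)
--
--     return ''.join(resultado)
-- ===== SOURCE B (Python) =====
-- def codificar_payload(payload, codificaciones):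
--     PAREJAS = {'(': ')', '{': '}', '[': ']', '<': '>'}
--     n = len(payload)
--     matched = []  # (pos, closer char) of each matched closer, in match order
--
--     def walk(i, expect):
--         # recursive-descent scan: consume chars from i until the closer
--         # `expect` is matched at this nesting level; return the next index
--         while i < n:
--             c = payload[i]
--             if c in PAREJAS:
--                 i = walk(i + 1, PAREJAS[c])
--             elif c == expect:
--                 matched.append((i, c))
--                 return i + 1
--             else:
--                 i += 1
--         return n
--
--     walk(0, None)
--     out = [codificaciones.get(c, c) if c in PAREJAS else c for c in payload]
--     for i, c in matched:
--         if c in codificaciones: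
--             out[i] = codificaciones[c]
--     return ''.join(out)
-- ===== Notes on version B (the rewrite author's own statement) =====
-- stated objective: alternative
-- what changed: B replaces A's explicit stack of (char, position) pairs and its final stack-draining loop by a recursive-descent scan (matching context held in the call nesting) that only collects matched-closer positions, followed by a flat pass that encodes every opener and the collected closers.
import Mathlib
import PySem

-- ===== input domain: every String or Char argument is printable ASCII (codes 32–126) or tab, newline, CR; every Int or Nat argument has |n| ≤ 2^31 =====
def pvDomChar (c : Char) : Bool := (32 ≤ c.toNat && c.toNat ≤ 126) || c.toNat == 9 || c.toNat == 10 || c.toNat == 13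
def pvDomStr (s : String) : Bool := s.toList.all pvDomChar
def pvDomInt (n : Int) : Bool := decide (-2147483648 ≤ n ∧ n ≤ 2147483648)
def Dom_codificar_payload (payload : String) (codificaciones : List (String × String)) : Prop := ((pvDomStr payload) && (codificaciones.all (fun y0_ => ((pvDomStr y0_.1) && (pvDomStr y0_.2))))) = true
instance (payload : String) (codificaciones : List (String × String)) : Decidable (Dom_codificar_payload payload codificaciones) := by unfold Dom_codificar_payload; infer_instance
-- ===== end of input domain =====

-- B replaces A's explicit stack of (char, position) pairs by a recursive-descent scan
-- (matching context held in the call nesting) that collects matched-closer positions,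
-- then a flat pass encodes all openers and the collected closers. Objective: alternative.

-- ===== PORT A =====
-- parejas_caracteres = {'(': ')', '{': '}', '[': ']', '<': '>'}  as a lookup
def pvPareja? (c : Char) : Option Char :=
  if c = '(' then some ')' else if c = '{' then some '}'
  else if c = '[' then some ']' else if c = '<' then some '>' else none

-- parejas_caracteres_inverso
def pvInversa? (c : Char) : Option Char :=
  if c = ')' then some '(' else if c = '}' then some '{'
  else if c = ']' then some '[' else if c = '>' then some '<' else none

-- codificar_en_posicion: sets resultado[pos] only when caracter is a key
def pvEnc (d : PySem.Dict String String) (res : List String) (pos : Nat) (car : Char) : List String :=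
  match PySem.Dict.get? d car.toString with
  | some v => res.set pos v
  | none => res

-- the body of A's `for i, char in enumerate(payload)` loop
def pvAStep (d : PySem.Dict String String)
    (st : List (Char × Nat) × List String) (ci : Char × Nat) :
    List (Char × Nat) × List String :=
  if (pvPareja? ci.1).isSome then ((ci.1, ci.2) :: st.1, st.2)
  else
    match pvInversa? ci.1, st.1 with
    | some o, (u, p) :: t =>
        if o = u then (t, pvEnc d (pvEnc d st.2 p u) ci.2 ci.1) else st
    | _, _ => st

def codificar_payload (payload : String) (codificaciones : List (String × String)) : String :=
  let d := PySem.Dict.ofList codificaciones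
  let st := (payload.toList.zipIdx).foldl (pvAStep d) ([], payload.toList.map (fun c => c.toString))
  -- while pila: pop and encode the opener's position
  let res := st.1.foldl (fun r (cp : Char × Nat) => pvEnc d r cp.2 cp.1) st.2
  String.join res

-- ===== PORT B =====
-- B's `walk(i, expect)`: recursive-descent scan over the (char, index) suffix; consumes
-- until the expected closer is matched at this level, collecting matched (pos, closer)
-- pairs; the subtype bound (only totality bookkeeping) records that it consumes forward.
def pvWalk (l : List (Char × Nat)) (e : Option Char) :
    {r : List (Char × Nat) × List (Nat × Char) // r.1.length ≤ l.length} :=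
  match l with
  | [] => ⟨([], []), Nat.le_refl 0⟩
  | (c, i) :: rest =>
    match pvPareja? c with
    | some cl =>
        match pvWalk rest (some cl) with
        | ⟨(rem1, m1), hle1⟩ =>
          match pvWalk rem1 e with
          | ⟨(rem2, m2), hle2⟩ =>
            ⟨(rem2, m1 ++ m2), Nat.le_trans (Nat.le_trans hle2 hle1) (Nat.le_succ _)⟩
    | none =>
        if some c = e then ⟨(rest, [(i, c)]), Nat.le_succ _⟩
        else
          match pvWalk rest e with
          | ⟨r, hle⟩ => ⟨r, Nat.le_trans hle (Nat.le_succ _)⟩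
termination_by l.length
decreasing_by
  · simp
  · simp_all
  · simp

-- B's flat comprehension entry: codificaciones.get(c, c) if c in PAREJAS else c
def pvBEnc (d : PySem.Dict String String) (c : Char) : String :=
  if (pvPareja? c).isSome then PySem.Dict.getD d c.toString c.toString else c.toString

def codificar_payload_alt (payload : String) (codificaciones : List (String × String)) : String :=
  let d := PySem.Dict.ofList codificaciones
  let matched := (pvWalk (payload.toList.zipIdx) none).val.2
  let out := payload.toList.map (pvBEnc d)
  let res := matched.foldl (fun r (ic : Nat × Char) => pvEnc d r ic.1 ic.2) out
  String.join res

-- ===== PRECONDITION & SPEC =====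
def Spec_codificar_payload (payload : String) (codificaciones : List (String × String)) (out : String) : Prop := out = codificar_payload_alt payload codificaciones
instance (payload : String) (codificaciones : List (String × String)) (out : String) : Decidable (Spec_codificar_payload payload codificaciones out) := by unfold Spec_codificar_payload; infer_instance

-- ===== CLAIM (what is proved, stated in full; the proofs are below) =====
def Claim_equal_codificar_payload : Prop := ∀ (payload : String) (codificaciones : List (String × String)), Dom_codificar_payload payload codificaciones → Spec_codificar_payload payload codificaciones (codificar_payload payload codificaciones)

-- ===== LEMMAS AND PROOFS =====

-- proof-internal stack machine: stack of opener chars, encodes a matched closer at pop time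
def pvBStep (d : PySem.Dict String String)
    (st : List Char × List String) (ci : Char × Nat) :
    List Char × List String :=
  if (pvPareja? ci.1).isSome then (ci.1 :: st.1, st.2)
  else
    match pvInversa? ci.1, st.1 with
    | some o, u :: t => if u = o then (t, pvEnc d st.2 ci.2 ci.1) else st
    | _, _ => st

-- encode all stack entries, innermost (bottom) first
def pvEncAll (d : PySem.Dict String String) (pila : List (Char × Nat)) (r : List String) : List String :=
  pila.foldr (fun cp r => pvEnc d r cp.2 cp.1) r

-- encode all opener positions of an (char, index) list, left to right
def pvEncOp (d : PySem.Dict String String) (l : List (Char × Nat)) (r : List String) : List String :=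
  l.foldl (fun r ci => if (pvPareja? ci.1).isSome then pvEnc d r ci.2 ci.1 else r) r

theorem pvEnc_comm (d : PySem.Dict String String) (r : List String) {p q : Nat}
    (c e : Char) (hpq : p ≠ q) :
    pvEnc d (pvEnc d r p c) q e = pvEnc d (pvEnc d r q e) p c := by
  unfold pvEnc
  cases PySem.Dict.get? d c.toString <;> cases PySem.Dict.get? d e.toString <;>
    first
      | rfl
      | exact List.set_comm _ _ hpq

theorem pvEncAll_enc (d : PySem.Dict String String) (pila : List (Char × Nat))
    (r : List String) {p : Nat} (c : Char) (h : ∀ cp ∈ pila, cp.2 ≠ p) :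
    pvEncAll d pila (pvEnc d r p c) = pvEnc d (pvEncAll d pila r) p c := by
  induction pila with
  | nil => rfl
  | cons x t ih =>
      have hx : x.2 ≠ p := h x (by simp)
      simp only [pvEncAll, List.foldr_cons] at *
      rw [ih (fun cp hcp => h cp (by simp [hcp])), pvEnc_comm d _ _ _ hx]

theorem pvEncOp_enc (d : PySem.Dict String String) (l : List (Char × Nat)) :
    ∀ (r : List String) (p : Nat) (c : Char), (∀ ci ∈ l, ci.2 ≠ p) →
    pvEncOp d l (pvEnc d r p c) = pvEnc d (pvEncOp d l r) p c := by
  induction l with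
  | nil => intro r p c _; rfl
  | cons x t ih =>
      intro r p c h
      have hx : x.2 ≠ p := h x (by simp)
      simp only [pvEncOp, List.foldl_cons] at *
      by_cases hop : (pvPareja? x.1).isSome
      · rw [if_pos hop, if_pos hop, pvEnc_comm d r c x.1 (Ne.symm hx),
            ih _ _ _ (fun ci hci => h ci (by simp [hci]))]
      · rw [if_neg hop, if_neg hop, ih _ _ _ (fun ci hci => h ci (by simp [hci]))]

theorem pvDrain_eq_encAll (d : PySem.Dict String String) (pila : List (Char × Nat)) :
    ∀ (r : List String), (pila.map Prod.snd).Pairwise (· ≠ ·) →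
    pila.foldl (fun r (cp : Char × Nat) => pvEnc d r cp.2 cp.1) r = pvEncAll d pila r := by
  induction pila with
  | nil => intro r _; rfl
  | cons x t ih =>
      intro r h
      simp only [List.map_cons, List.pairwise_cons] at h
      have hne : ∀ cp ∈ t, cp.2 ≠ x.2 :=
        fun cp hcp => (h.1 cp.2 (List.mem_map_of_mem hcp)).symm
      simp only [List.foldl_cons, pvEncAll, List.foldr_cons]
      rw [ih _ h.2]
      exact pvEncAll_enc d t r x.1 hne

theorem pvMain (d : PySem.Dict String String) (l : List Char) :
    ∀ (n : Nat) (pila : List (Char × Nat)) (r : List String),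
    (∀ cp ∈ pila, cp.2 < n) → ((pila.map Prod.snd).Pairwise (· ≠ ·)) →
    (let st := (l.zipIdx n).foldl (pvAStep d) (pila, r);
     st.1.foldl (fun r (cp : Char × Nat) => pvEnc d r cp.2 cp.1) st.2)
    = ((l.zipIdx n).foldl (pvBStep d) (pila.map Prod.fst, pvEncOp d (l.zipIdx n) (pvEncAll d pila r))).2 := by
  induction l with
  | nil =>
      intro n pila r _ hpw
      simpa [pvEncOp] using pvDrain_eq_encAll d pila r hpw
  | cons c t ih =>
      intro n pila r hlt hpw
      have hrest : ∀ ci ∈ t.zipIdx (n + 1), n + 1 ≤ ci.2 :=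
        List.forall_mem_zipIdx.mpr (fun i _ => Nat.le_add_right (n + 1) i)
      simp only [List.zipIdx_cons, List.foldl_cons]
      by_cases hop : (pvPareja? c).isSome
      · -- opener: A pushes (c, n); B pushes c; first pass already encoded position n
        have hA : pvAStep d (pila, r) (c, n) = ((c, n) :: pila, r) := by
          simp [pvAStep, hop]
        have hB : ∀ res, pvBStep d (pila.map Prod.fst, res) (c, n) = (c :: pila.map Prod.fst, res) := by
          intro res; simp [pvBStep, hop]
        rw [hA, hB]
        have hlt' : ∀ cp ∈ ((c, n) :: pila), cp.2 < n + 1 := by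
          intro cp hcp
          rcases List.mem_cons.mp hcp with h | h
          · simp [h]
          · exact Nat.lt_succ_of_lt (hlt cp h)
        have hpw' : (((c, n) :: pila).map Prod.snd).Pairwise (· ≠ ·) := by
          simp only [List.map_cons, List.pairwise_cons]
          exact ⟨fun q hq => by
            obtain ⟨cp, hcp, he⟩ := List.mem_map.mp hq
            exact Nat.ne_of_gt (he ▸ hlt cp hcp), hpw⟩
        have := ih (n + 1) ((c, n) :: pila) r hlt' hpw'
        simp only [List.map_cons] at this
        rw [this]
        congr 2
        simp only [pvEncOp, List.foldl_cons, if_pos hop]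
        rfl
      · -- not an opener
        match hinv : pvInversa? c with
        | some o =>
            match pila with
            | [] =>
                have hA : pvAStep d (([] : List (Char × Nat)), r) (c, n) = ([], r) := by
                  simp [pvAStep, hop, hinv]
                have hB : ∀ res, pvBStep d (([] : List Char), res) (c, n) = ([], res) := by
                  intro res; simp [pvBStep, hop, hinv]
                simp only [List.map_nil]
                rw [hA, hB]
                have := ih (n + 1) [] r (by simp) (by simp)
                simp only [List.map_nil] at this
                rw [this]
                congr 2
                simp [pvEncOp, hop]
            | (u, p) :: pt =>
                by_cases hm : o = u
                · -- matched closer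
                  have hA : pvAStep d ((u, p) :: pt, r) (c, n)
                      = (pt, pvEnc d (pvEnc d r p u) n c) := by
                    simp [pvAStep, hop, hinv, hm]
                  have hB : ∀ res, pvBStep d (u :: pt.map Prod.fst, res) (c, n)
                      = (pt.map Prod.fst, pvEnc d res n c) := by
                    intro res; simp [pvBStep, hop, hinv, hm]
                  simp only [List.map_cons]
                  rw [hA, hB]
                  simp only [List.map_cons, List.pairwise_cons] at hpw
                  have hptlt : ∀ cp ∈ pt, cp.2 < n + 1 :=
                    fun cp hcp => Nat.lt_succ_of_lt (hlt cp (by simp [hcp]))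
                  have hih := ih (n + 1) pt (pvEnc d (pvEnc d r p u) n c) hptlt hpw.2
                  -- rearrange the encodes: all positions involved are distinct
                  have hptn : ∀ cp ∈ pt, cp.2 ≠ n :=
                    fun cp hcp => Nat.ne_of_lt (hlt cp (by simp [hcp]))
                  have hptp : ∀ cp ∈ pt, cp.2 ≠ p :=
                    fun cp hcp => Ne.symm (hpw.1 cp.2 (List.mem_map_of_mem hcp))
                  have hrn : ∀ ci ∈ t.zipIdx (n + 1), ci.2 ≠ n :=
                    fun ci hci => by have := hrest ci hci; omega
                  have hstep : pvEncOp d ((c, n) :: t.zipIdx (n + 1)) (pvEncAll d ((u, p) :: pt) r)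
                      = pvEncOp d (t.zipIdx (n + 1)) (pvEncAll d ((u, p) :: pt) r) := by
                    simp [pvEncOp, hop]
                  have heq : pvEncOp d (t.zipIdx (n + 1)) (pvEncAll d pt (pvEnc d (pvEnc d r p u) n c))
                      = pvEnc d (pvEncOp d (t.zipIdx (n + 1)) (pvEncAll d ((u, p) :: pt) r)) n c := by
                    calc pvEncOp d (t.zipIdx (n + 1)) (pvEncAll d pt (pvEnc d (pvEnc d r p u) n c))
                        = pvEncOp d (t.zipIdx (n + 1)) (pvEnc d (pvEnc d (pvEncAll d pt r) p u) n c) := by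
                          rw [pvEncAll_enc d pt _ c hptn, pvEncAll_enc d pt r u hptp]
                      _ = pvEnc d (pvEncOp d (t.zipIdx (n + 1)) (pvEnc d (pvEncAll d pt r) p u)) n c := by
                          rw [pvEncOp_enc d _ _ _ _ hrn]
                      _ = pvEnc d (pvEncOp d (t.zipIdx (n + 1)) (pvEncAll d ((u, p) :: pt) r)) n c := rfl
                  rw [hih, hstep, heq]
                · -- closer mismatching the top of the stack: both leave the state alone
                  have hA : pvAStep d ((u, p) :: pt, r) (c, n) = ((u, p) :: pt, r) := by
                    simp [pvAStep, hop, hinv, hm]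
                  have hB : ∀ res, pvBStep d (u :: pt.map Prod.fst, res) (c, n)
                      = (u :: pt.map Prod.fst, res) := by
                    have hm' : u ≠ o := fun h => hm h.symm
                    intro res; simp [pvBStep, hop, hinv, hm']
                  simp only [List.map_cons]
                  rw [hA, hB]
                  have := ih (n + 1) ((u, p) :: pt) r
                    (fun cp hcp => Nat.lt_succ_of_lt (hlt cp hcp)) hpw
                  simp only [List.map_cons] at this
                  rw [this]
                  congr 2
                  simp [pvEncOp, hop]
        | none =>
            have hA : pvAStep d (pila, r) (c, n) = (pila, r) := by
              simp [pvAStep, hop, hinv]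
            have hB : ∀ res, pvBStep d (pila.map Prod.fst, res) (c, n)
                = (pila.map Prod.fst, res) := by
              intro res
              simp only [pvBStep, hop, hinv]
              cases pila.map Prod.fst <;> simp
            rw [hA, hB]
            have := ih (n + 1) pila r (fun cp hcp => Nat.lt_succ_of_lt (hlt cp hcp)) hpw
            rw [this]
            congr 2
            simp [pvEncOp, hop]

-- B's flat first pass equals folding the opener-encodes over the enumerated suffix
theorem pvFirstPass (d : PySem.Dict String String) (l : List Char) :
    ∀ (pre : List String),
    pvEncOp d (l.zipIdx pre.length) (pre ++ l.map (fun c => c.toString)) = pre ++ l.map (pvBEnc d) := by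
  induction l with
  | nil => intro pre; simp [pvEncOp]
  | cons c t ih =>
      intro pre
      simp only [List.zipIdx_cons, List.map_cons, pvEncOp, List.foldl_cons]
      by_cases hop : (pvPareja? c).isSome
      · rw [if_pos hop]
        have hset : pvEnc d (pre ++ c.toString :: t.map (fun c => c.toString)) pre.length c
            = (pre ++ [pvBEnc d c]) ++ t.map (fun c => c.toString) := by
          unfold pvEnc pvBEnc
          rw [if_pos hop]
          cases hg : PySem.Dict.get? d c.toString with
          | some v =>
              dsimp only
              rw [List.set_append_right _ _ (Nat.le_refl _)]
              simp only [PySem.Dict.getD, hg, Nat.sub_self, List.set_cons_zero,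
                Option.getD_some, List.append_assoc, List.singleton_append]
          | none =>
              dsimp only
              simp only [PySem.Dict.getD, hg, Option.getD_none, List.append_assoc,
                List.singleton_append]
        rw [hset]
        have := ih (pre ++ [pvBEnc d c])
        simp only [List.length_append, List.length_cons, List.length_nil, Nat.zero_add] at this
        rw [show pre.length + 1 = pre.length + [pvBEnc d c].length by simp] at this
        simpa [pvEncOp, pvBEnc, hop] using this
      · rw [if_neg hop]
        have : c.toString = pvBEnc d c := by simp [pvBEnc, hop]
        rw [this]
        have := ih (pre ++ [pvBEnc d c])
        simp only [List.length_append, List.length_cons, List.length_nil, Nat.zero_add] at this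
        rw [show pre.length + 1 = pre.length + [pvBEnc d c].length by simp] at this
        simpa [pvEncOp] using this

-- ===== new lemmas: recursive descent vs the stack machine =====

theorem pvPareja_inversa (u c : Char) : pvPareja? u = some c ↔ pvInversa? c = some u := by
  constructor
  · intro h
    unfold pvPareja? at h
    split_ifs at h
    all_goals injection h with h; subst h; subst_vars; decide
  · intro h
    unfold pvInversa? at h
    split_ifs at h
    all_goals injection h with h; subst h; subst_vars; decide

-- unfolding lemmas for pvWalk
theorem pvWalk_nil (e : Option Char) : (pvWalk [] e).val = ([], []) := by
  rw [pvWalk]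

theorem pvWalk_cons_opener (c : Char) (i : Nat) (rest : List (Char × Nat)) (e : Option Char)
    (cl : Char) (hP : pvPareja? c = some cl) :
    (pvWalk ((c, i) :: rest) e).val =
      ((pvWalk (pvWalk rest (some cl)).val.1 e).val.1,
       (pvWalk rest (some cl)).val.2 ++ (pvWalk (pvWalk rest (some cl)).val.1 e).val.2) := by
  rw [pvWalk]
  simp [hP]

theorem pvWalk_cons_match (c : Char) (i : Nat) (rest : List (Char × Nat)) (e : Option Char)
    (hP : pvPareja? c = none) (hE : some c = e) :
    (pvWalk ((c, i) :: rest) e).val = (rest, [(i, c)]) := by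
  rw [pvWalk]
  simp [hP, hE]

theorem pvWalk_cons_skip (c : Char) (i : Nat) (rest : List (Char × Nat)) (e : Option Char)
    (hP : pvPareja? c = none) (hE : ¬ some c = e) :
    (pvWalk ((c, i) :: rest) e).val = (pvWalk rest e).val := by
  rw [pvWalk]
  simp [hP, hE]

-- a top-level walk (no expected closer) consumes the whole suffix
theorem pvWalk_none_rem (n : Nat) :
    ∀ (l : List (Char × Nat)), l.length ≤ n → (pvWalk l none).val.1 = [] := by
  induction n with
  | zero =>
      intro l h
      have : l = [] := List.eq_nil_of_length_eq_zero (Nat.le_zero.mp h)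
      subst this; rw [pvWalk_nil]
  | succ n ih =>
      intro l h
      match l with
      | [] => rw [pvWalk_nil]
      | (c, i) :: rest =>
          simp only [List.length_cons, Nat.succ_le_succ_iff] at h
          cases hP : pvPareja? c with
          | some cl =>
              rw [pvWalk_cons_opener c i rest none cl hP]
              exact ih _ (Nat.le_trans (pvWalk rest (some cl)).property h)
          | none =>
              rw [pvWalk_cons_skip c i rest none hP (by simp)]
              exact ih _ h

-- the stack machine from a stack whose top opener expects `e` behaves as: run the walk,
-- apply its matched-closer encodes, pop, and continue on the remainder
theorem pvWalkMach (d : PySem.Dict String String) (n : Nat) :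
    ∀ (l : List (Char × Nat)), l.length ≤ n →
    ∀ (e : Option Char) (S : List Char) (res : List String),
    (∀ cl, e = some cl → ∃ u t, S = u :: t ∧ pvPareja? u = some cl) →
    (e = none → S = []) →
    ((l.foldl (pvBStep d) (S, res)).2
        = ((pvWalk l e).val.1.foldl (pvBStep d)
            (S.tail, (pvWalk l e).val.2.foldl (fun r (ic : Nat × Char) => pvEnc d r ic.1 ic.2) res)).2)
    ∧ ((pvWalk l e).val.1 ≠ [] →
        l.foldl (pvBStep d) (S, res)
          = (pvWalk l e).val.1.foldl (pvBStep d)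
              (S.tail, (pvWalk l e).val.2.foldl (fun r (ic : Nat × Char) => pvEnc d r ic.1 ic.2) res)) := by
  induction n with
  | zero =>
      intro l h
      have : l = [] := List.eq_nil_of_length_eq_zero (Nat.le_zero.mp h)
      subst this
      intro e S res _ _
      constructor
      · simp [pvWalk_nil]
      · intro hne; rw [pvWalk_nil] at hne; exact absurd rfl hne
  | succ n ih =>
      intro l hl e S res hS hN
      match l with
      | [] =>
          constructor
          · simp [pvWalk_nil]
          · intro hne; rw [pvWalk_nil] at hne; exact absurd rfl hne
      | (c, i) :: rest =>
          simp only [List.length_cons, Nat.succ_le_succ_iff] at hl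
          simp only [List.foldl_cons]
          cases hP : pvPareja? c with
          | some cl =>
              -- opener: push, recurse one level deeper
              have hstep : pvBStep d (S, res) (c, i) = (c :: S, res) := by
                simp [pvBStep, hP]
              rw [hstep, pvWalk_cons_opener c i rest e cl hP]
              have hinner := ih rest hl (some cl) (c :: S) res
                (fun cl' h' => ⟨c, S, rfl, by rw [hP, h']⟩) (by intro h; cases h)
              by_cases hrem : (pvWalk rest (some cl)).val.1 = []
              · -- walk ran to the end of the string inside this opener
                constructor
                · rw [hinner.1, hrem]
                  simp [pvWalk_nil]
                · intro hne
                  rw [hrem] at hne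
                  rw [pvWalk_nil] at hne
                  exact absurd rfl hne
              · have hfull := hinner.2 hrem
                have houter := ih (pvWalk rest (some cl)).val.1
                  (Nat.le_trans (pvWalk rest (some cl)).property hl) e S
                  ((pvWalk rest (some cl)).val.2.foldl (fun r (ic : Nat × Char) => pvEnc d r ic.1 ic.2) res)
                  hS hN
                rw [List.foldl_append]
                constructor
                · rw [hfull]; simp only [List.tail_cons] at *; exact houter.1
                · intro hne
                  rw [hfull]; simp only [List.tail_cons] at *; exact houter.2 hne
          | none =>
              by_cases hE : some c = e
              · -- matched closer: pop, encode, continue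
                have he : e = some c := hE.symm
                subst he
                obtain ⟨u, t, rfl, hu⟩ := hS c rfl
                have hic : pvInversa? c = some u := (pvPareja_inversa u c).mp hu
                have hstep : pvBStep d (u :: t, res) (c, i) = (t, pvEnc d res i c) := by
                  simp [pvBStep, hP, hic]
                rw [hstep, pvWalk_cons_match c i rest (some c) hP rfl]
                exact ⟨rfl, fun _ => rfl⟩
              · -- ignored char: machine state unchanged
                have hstep : pvBStep d (S, res) (c, i) = (S, res) := by
                  simp only [pvBStep, hP, Option.isSome_none, Bool.false_eq_true, if_false]
                  cases hic : pvInversa? c with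
                  | none => cases S <;> rfl
                  | some o =>
                      cases hSo : S with
                      | nil => rfl
                      | cons u t =>
                          have huo : u ≠ o := by
                            intro h; subst h
                            have : pvPareja? u = some c := (pvPareja_inversa u c).mpr hic
                            rcases e with _ | cl
                            · exact absurd (hN rfl) (by simp [hSo])
                            · obtain ⟨u', t', he, hu'⟩ := hS cl rfl
                              rw [hSo] at he
                              injection he with h1 h2
                              subst h1
                              rw [this] at hu'
                              exact hE hu'
                          simp [huo]
                rw [hstep, pvWalk_cons_skip c i rest e hP hE]
                exact ih rest hl e S res hS hN

-- ===== VERDICT (by name: the statement is the Claim_ definition above) =====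
theorem codificar_payload_spec : Claim_equal_codificar_payload := by
  intro payload codificaciones _
  have hfp := pvFirstPass (PySem.Dict.ofList codificaciones) payload.toList []
  simp only [List.nil_append, List.length_nil] at hfp
  have hm := pvMain (PySem.Dict.ofList codificaciones) payload.toList 0 []
    (payload.toList.map (fun c => c.toString)) (by simp) (by simp)
  simp only [List.map_nil, pvEncAll, List.foldr_nil] at hm
  rw [hfp] at hm
  have hw := (pvWalkMach (PySem.Dict.ofList codificaciones)
    (payload.toList.zipIdx).length (payload.toList.zipIdx) (Nat.le_refl _) none []
    (payload.toList.map (pvBEnc (PySem.Dict.ofList codificaciones)))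
    (fun cl h => by cases h) (fun _ => rfl)).1
  have hrem := pvWalk_none_rem (payload.toList.zipIdx).length (payload.toList.zipIdx) (Nat.le_refl _)
  rw [hrem] at hw
  simp only [List.foldl_nil] at hw
  show String.join
      (let st := (payload.toList.zipIdx).foldl (pvAStep (PySem.Dict.ofList codificaciones))
        ([], payload.toList.map (fun c => c.toString));
       st.1.foldl (fun r (cp : Char × Nat) => pvEnc (PySem.Dict.ofList codificaciones) r cp.2 cp.1) st.2)
    = String.join
      ((pvWalk (payload.toList.zipIdx) none).val.2.foldl
        (fun r (ic : Nat × Char) => pvEnc (PySem.Dict.ofList codificaciones) r ic.1 ic.2)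
        (payload.toList.map (pvBEnc (PySem.Dict.ofList codificaciones))))
  exact congrArg String.join (hm.trans hw)
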